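-- pv_equiv track=rewrite | github.com/absognety/Interview-Process-Coding-Questions | LeadSquared/maximumSumLikeTimeCoefficients.py | maxSumLikeTimeCoeff
-- ===== SOURCE A (Python) =====
-- import itertools
--
-- def maxSumLikeTimeCoeff(arr,N):
--     all_sums = []
--     for r in range(1,N+1):
--         combinations = set(itertools.combinations(arr,r))
--         for x in combinations:
--             sums = 0
--             for i in range(len(x)):
--                 sums += (i+1) * x[i]
--             all_sums.append(sums)
--     return max(all_sums)
-- ===== SOURCE B (Python) =====
-- from functools import lru_cache
--
-- def maxSumLikeTimeCoeff(arr, N):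
--     a = tuple(arr)
--     n = len(a)
--
--     @lru_cache(maxsize=None)
--     def g(i, k):
--         # best weighted-sum extension (possibly empty) over a[i:], at most k more
--         # picks; the next pick gets weight N + 1 - k
--         if i == n or k == 0:
--             return 0
--         return max(g(i + 1, k), (N + 1 - k) * a[i] + g(i + 1, k - 1))
--
--     # best over the choice of the first picked element (weight 1)
--     return max(a[i] + g(i + 1, N - 1) for i in range(n))
-- ===== Notes on version B (the rewrite author's own statement) =====
-- stated objective: faster
-- what changed: replaces the exponential enumeration of all subsequences (itertools.combinations for every size r) by a memoized DP over (start index, remaining picks) whose pick-weight is recovered as N+1-k, taking the max over the choice of the first picked element; intended as asymptotically faster: probe runs measured B 300-3900x at n=16 when A drew a large N (unconfirmed in runs where A stayed under the 5 ms floor), and A timed out at n=64 where B returned; Pre_ excludes N < 1 and empty arr, where A's max([]) raises ValueError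
import Mathlib
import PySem

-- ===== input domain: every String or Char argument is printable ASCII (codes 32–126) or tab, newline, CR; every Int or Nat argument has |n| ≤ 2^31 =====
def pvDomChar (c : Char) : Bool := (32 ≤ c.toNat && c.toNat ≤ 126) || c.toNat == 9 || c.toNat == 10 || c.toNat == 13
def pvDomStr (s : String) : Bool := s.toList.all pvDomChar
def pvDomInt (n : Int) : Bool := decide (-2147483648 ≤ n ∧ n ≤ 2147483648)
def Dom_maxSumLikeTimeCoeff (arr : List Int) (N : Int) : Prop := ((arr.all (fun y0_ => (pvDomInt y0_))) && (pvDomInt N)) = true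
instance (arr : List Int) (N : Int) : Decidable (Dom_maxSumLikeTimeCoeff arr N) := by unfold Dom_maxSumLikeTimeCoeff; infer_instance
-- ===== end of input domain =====

-- B replaces A's exponential enumeration of all subsequences by a memoized DP over
-- (start index, remaining picks); intended as faster (probe runs measured B
-- 300-3900x at n=16 when A drew a large N, and A timed out at n=64 where B returned).

-- ===== PORT A =====
-- inner loop: sums = 0; for i in range(len(x)): sums += (i+1) * x[i]
def pvSumsOf (x : List Int) : Int :=
  (PySem.List.pyRange 0 (PySem.List.len x) 1).foldl
    (fun sums i => sums + (i + 1) * PySem.List.pyGetD x i 0) 0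

def maxSumLikeTimeCoeff (arr : List Int) (N : Int) : Int :=
  let all_sums : List Int :=
    (PySem.List.pyRange 1 (N + 1) 1).foldl
      (fun acc r =>
        let combinations := PySem.Set.ofList (PySem.List.combinations arr r.toNat)
        combinations.foldl (fun acc2 x => acc2 ++ [pvSumsOf x]) acc)
      []
  match PySem.List.max? all_sums (fun v => v) with
  | some m => m
  | none => 0      -- unreachable under Pre_: Python's max([]) raises ValueError

-- ===== PORT B =====
-- g(i, k) of Source B, with a[i:] as a list; next pick gets weight N + 1 - k
def pvG (N : Int) : List Int → Int → Int
  | [], _ => 0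
  | a :: t, k => if k = 0 then 0 else max (pvG N t k) ((N + 1 - k) * a + pvG N t (k - 1))

-- the generator (a[i] + g(i+1, N-1) for i in range(n)), as the list of its values
def pvCands (N : Int) : List Int → List Int
  | [] => []
  | a :: t => (a + pvG N t (N - 1)) :: pvCands N t

def maxSumLikeTimeCoeff_alt (arr : List Int) (N : Int) : Int :=
  match PySem.List.max? (pvCands N arr) (fun v => v) with
  | some m => m
  | none => 0      -- unreachable under Pre_: Python's max of an empty generator raises

-- ===== PRECONDITION & SPEC =====
-- Pre_ excludes exactly N < 1 and arr = [], where A's all_sums is empty and max([]) raises ValueError.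
def Pre_maxSumLikeTimeCoeff (arr : List Int) (N : Int) : Prop := 1 ≤ N ∧ arr ≠ []
instance (arr : List Int) (N : Int) : Decidable (Pre_maxSumLikeTimeCoeff arr N) := by
  unfold Pre_maxSumLikeTimeCoeff; infer_instance

def pvWitness_maxSumLikeTimeCoeff : List Int × Int := ([1, -2, 3], 2)

def Spec_maxSumLikeTimeCoeff (arr : List Int) (N : Int) (out : Int) : Prop := out = maxSumLikeTimeCoeff_alt arr N
instance (arr : List Int) (N : Int) (out : Int) : Decidable (Spec_maxSumLikeTimeCoeff arr N out) := by unfold Spec_maxSumLikeTimeCoeff; infer_instance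

-- ===== CLAIM (what is proved, stated in full; the proofs are below) =====
def Claim_equal_maxSumLikeTimeCoeff : Prop := ∀ (arr : List Int) (N : Int), Dom_maxSumLikeTimeCoeff arr N → Pre_maxSumLikeTimeCoeff arr N → Spec_maxSumLikeTimeCoeff arr N (maxSumLikeTimeCoeff arr N)

-- ===== LEMMAS AND PROOFS =====

-- weighted sum of a picked subsequence, first weight p
def pvWsum (p : Int) : List Int → Int
  | [] => 0
  | a :: t => p * a + pvWsum (p + 1) t

-- A's inner loop computes pvWsum 1
theorem pvSumsOf_enum (x : List Int) (s : Int) (acc : Int) :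
    (PySem.List.enumerate x s).foldl (fun sums p => sums + (p.1 + 1) * p.2) acc
      = acc + pvWsum (s + 1) x := by
  induction x generalizing s acc with
  | nil => simp [PySem.List.enumerate, pvWsum]
  | cons a t ih =>
      rw [PySem.List.enumerate_cons]
      simp only [List.foldl_cons]
      rw [ih, pvWsum]
      ring

theorem pvSumsOf_eq_wsum (x : List Int) : pvSumsOf x = pvWsum 1 x := by
  unfold pvSumsOf
  rw [show (PySem.List.pyRange 0 (PySem.List.len x) 1).foldl
        (fun sums i => sums + (i + 1) * PySem.List.pyGetD x i 0) 0
      = ((PySem.List.pyRange 0 (PySem.List.len x) 1).map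
          (fun j => ((j : Int), PySem.List.pyGetD x j 0))).foldl
          (fun sums p => sums + (p.1 + 1) * p.2) 0 by
    rw [List.foldl_map]]
  rw [← PySem.List.enumerate_eq_map_pyRange (d := 0)]
  rw [pvSumsOf_enum]
  norm_num

-- A's list of sums
def pvAllSums (arr : List Int) (N : Int) : List Int :=
  (PySem.List.pyRange 1 (N + 1) 1).foldl
    (fun acc r =>
      (PySem.Set.ofList (PySem.List.combinations arr r.toNat)).foldl
        (fun acc2 x => acc2 ++ [pvSumsOf x]) acc)
    []

theorem maxSumLikeTimeCoeff_eq_match (arr : List Int) (N : Int) :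
    maxSumLikeTimeCoeff arr N
      = match PySem.List.max? (pvAllSums arr N) (fun v => v) with
        | some m => m
        | none => 0 := rfl

theorem pvAllSums_eq_flatMap (arr : List Int) (N : Int) :
    pvAllSums arr N
      = (PySem.List.pyRange 1 (N + 1) 1).flatMap
          (fun r => (PySem.Set.ofList (PySem.List.combinations arr r.toNat)).map pvSumsOf) := by
  unfold pvAllSums
  have h : ∀ (l : List Int) (acc : List Int),
      l.foldl (fun acc r =>
        (PySem.Set.ofList (PySem.List.combinations arr r.toNat)).foldl
          (fun acc2 x => acc2 ++ [pvSumsOf x]) acc) acc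
      = acc ++ l.flatMap
          (fun r => (PySem.Set.ofList (PySem.List.combinations arr r.toNat)).map pvSumsOf) := by
    intro l
    induction l with
    | nil => intro acc; simp
    | cons r rs ih =>
        intro acc
        simp only [List.foldl_cons, List.flatMap_cons]
        rw [PySem.List.foldl_append_singleton_eq_map, ih, List.append_assoc]
  rw [h]; simp

-- membership characterization of A's sums
theorem mem_pvAllSums (arr : List Int) (N : Int) (v : Int) :
    v ∈ pvAllSums arr N ↔
      ∃ c : List Int, c.Sublist arr ∧ c ≠ [] ∧ (c.length : Int) ≤ N ∧ v = pvWsum 1 c := by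
  rw [pvAllSums_eq_flatMap]
  simp only [List.mem_flatMap, List.mem_map]
  constructor
  · rintro ⟨r, hr, x, hx, rfl⟩
    rw [PySem.List.mem_pyRange_one] at hr
    rw [PySem.Set.mem_ofList] at hx
    rw [PySem.List.mem_combinations_iff] at hx
    refine ⟨x, hx.1, ?_, ?_, pvSumsOf_eq_wsum x⟩
    · intro hnil
      subst hnil
      simp at hx
      omega
    · have hxl : (x.length : Int) = (r.toNat : Int) := by rw [hx.2]
      simp at hxl
      omega
  · rintro ⟨c, hsub, hne, hlen, rfl⟩
    have hcl : 1 ≤ c.length := by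
      cases c with
      | nil => exact absurd rfl hne
      | cons a t => simp
    refine ⟨(c.length : Int), ?_, c, ?_, pvSumsOf_eq_wsum c⟩
    · rw [PySem.List.mem_pyRange_one]
      constructor
      · exact_mod_cast hcl
      · omega
    · rw [PySem.Set.mem_ofList, PySem.List.mem_combinations_iff]
      exact ⟨hsub, by simp⟩

-- pvG upper bound: any sublist of t with at most k elements, weighted from N+1-k
theorem pvG_ub (N : Int) (t : List Int) (k : Int) (hk : 0 ≤ k) (c : List Int)
    (hsub : c.Sublist t) (hlen : (c.length : Int) ≤ k) :
    pvWsum (N + 1 - k) c ≤ pvG N t k := by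
  induction t generalizing c k with
  | nil =>
      cases List.sublist_nil.mp hsub
      simp [pvWsum, pvG]
  | cons a t ih =>
      by_cases hk0 : k = 0
      · subst hk0
        have : c = [] := by
          cases c with
          | nil => rfl
          | cons x xs => simp at hlen; omega
        subst this
        simp [pvWsum, pvG]
      · rw [pvG, if_neg hk0]
        cases hsub with
        | cons _ h =>
            exact le_trans (ih k hk c h hlen) (le_max_left _ _)
        | cons₂ _ h =>
            rename_i c'
            have hlc : ((c'.length : Int)) ≤ k - 1 := by simp at hlen; omega
            have hk1 : (0 : Int) ≤ k - 1 := by omega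
            refine le_trans ?_ (le_max_right _ _)
            rw [pvWsum]
            have hih := ih (k - 1) hk1 c' h hlc
            have harith : N + 1 - k + 1 = N + 1 - (k - 1) := by ring
            rw [harith]
            omega

-- pvG achievability: its value is the weighted sum of some sublist
theorem pvG_ach (N : Int) (t : List Int) (k : Int) (hk : 0 ≤ k) :
    ∃ c : List Int, c.Sublist t ∧ (c.length : Int) ≤ k ∧ pvG N t k = pvWsum (N + 1 - k) c := by
  induction t generalizing k with
  | nil => exact ⟨[], List.Sublist.refl _, by simpa using hk, by simp [pvG, pvWsum]⟩
  | cons a t ih =>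
      by_cases hk0 : k = 0
      · exact ⟨[], by simp, by simp [hk0], by simp [pvG, hk0, pvWsum]⟩
      · rw [pvG, if_neg hk0]
        rcases ih k hk with ⟨c1, hs1, hl1, he1⟩
        rcases ih (k - 1) (by omega) with ⟨c2, hs2, hl2, he2⟩
        rcases le_total (pvG N t k) ((N + 1 - k) * a + pvG N t (k - 1)) with hle | hle
        · refine ⟨a :: c2, List.Sublist.cons₂ a hs2, by simp; omega, ?_⟩
          rw [max_eq_right hle, pvWsum, he2]
          have harith : N + 1 - k + 1 = N + 1 - (k - 1) := by ring
          rw [harith]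
        · exact ⟨c1, List.Sublist.cons a hs1, hl1, by rw [max_eq_left hle, he1]⟩

-- every candidate of B is realized as a subsequence sum
theorem pvCands_realized (N : Int) (hN : 1 ≤ N) (arr : List Int) (v : Int)
    (hv : v ∈ pvCands N arr) :
    ∃ c : List Int, c.Sublist arr ∧ c ≠ [] ∧ (c.length : Int) ≤ N ∧ v = pvWsum 1 c := by
  induction arr with
  | nil => simp [pvCands] at hv
  | cons a t ih =>
      rw [pvCands, List.mem_cons] at hv
      rcases hv with rfl | hv
      · rcases pvG_ach N t (N - 1) (by omega) with ⟨c, hs, hl, he⟩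
        refine ⟨a :: c, List.Sublist.cons₂ a hs, by simp, by simp; omega, ?_⟩
        rw [pvWsum, he]
        have harith : N + 1 - (N - 1) = (1 : Int) + 1 := by ring
        rw [harith]
        ring
      · rcases ih hv with ⟨c, hs, hne, hl, he⟩
        exact ⟨c, List.Sublist.cons a hs, hne, hl, he⟩

-- every subsequence sum is dominated by some candidate of B
theorem pvCands_dominates (N : Int) (hN : 1 ≤ N) (arr : List Int) (c : List Int)
    (hsub : c.Sublist arr) (hne : c ≠ []) (hlen : (c.length : Int) ≤ N) :
    ∃ v ∈ pvCands N arr, pvWsum 1 c ≤ v := by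
  induction arr with
  | nil => cases List.sublist_nil.mp hsub; exact absurd rfl hne
  | cons a t ih =>
      cases hsub with
      | cons _ h =>
          rcases ih h with ⟨v, hv, hle⟩
          exact ⟨v, by rw [pvCands]; exact List.mem_cons_of_mem _ hv, hle⟩
      | cons₂ _ h =>
          refine ⟨a + pvG N t (N - 1), by rw [pvCands]; exact List.mem_cons_self, ?_⟩
          rw [pvWsum]
          rename_i c'
          have hl' : ((c'.length : Int)) ≤ N - 1 := by simp at hlen; omega
          have := pvG_ub N t (N - 1) (by omega) c' h hl'
          have harith : N + 1 - (N - 1) = (2 : Int) := by ring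
          rw [harith] at this
          have h2 : (1 : Int) + 1 = 2 := by norm_num
          rw [h2]
          omega

theorem pvAllSums_ne_nil (arr : List Int) (N : Int) (hN : 1 ≤ N) (hne : arr ≠ []) :
    pvAllSums arr N ≠ [] := by
  cases arr with
  | nil => exact absurd rfl hne
  | cons a t =>
      intro h
      have : pvWsum 1 [a] ∈ pvAllSums (a :: t) N := by
        rw [mem_pvAllSums]
        exact ⟨[a], by simp, by simp, by simp; omega, rfl⟩
      rw [h] at this
      simp at this

theorem pvCands_ne_nil (arr : List Int) (N : Int) (hne : arr ≠ []) :
    pvCands N arr ≠ [] := by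
  cases arr with
  | nil => exact absurd rfl hne
  | cons a t => simp [pvCands]

-- ===== VERDICT (by name: the statement is the Claim_ definition above) =====
theorem maxSumLikeTimeCoeff_spec : Claim_equal_maxSumLikeTimeCoeff := by
  intro arr N _ hpre
  rcases hpre with ⟨hN, hne⟩
  unfold Spec_maxSumLikeTimeCoeff maxSumLikeTimeCoeff_alt
  rw [maxSumLikeTimeCoeff_eq_match]
  have hA : pvAllSums arr N ≠ [] := pvAllSums_ne_nil arr N hN hne
  have hB : pvCands N arr ≠ [] := pvCands_ne_nil arr N hne
  rcases hma : PySem.List.max? (pvAllSums arr N) (fun v => v) with _ | ma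
  · exact absurd ((PySem.List.max?_eq_none_iff _ _).mp hma) hA
  rcases hmb : PySem.List.max? (pvCands N arr) (fun v => v) with _ | mb
  · exact absurd ((PySem.List.max?_eq_none_iff _ _).mp hmb) hB
  simp only
  have hmaMem : ma ∈ pvAllSums arr N := PySem.List.max?_mem hma
  have hmbMem : mb ∈ pvCands N arr := PySem.List.max?_mem hmb
  have hmaMax : ∀ y ∈ pvAllSums arr N, y ≤ ma := fun y hy => PySem.List.max?_isMax hma y hy
  have hmbMax : ∀ y ∈ pvCands N arr, y ≤ mb := fun y hy => PySem.List.max?_isMax hmb y hy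
  -- ma ≤ mb: ma is a subsequence sum, dominated by a candidate
  have h1 : ma ≤ mb := by
    rcases (mem_pvAllSums arr N ma).mp hmaMem with ⟨c, hsub, hcne, hlen, rfl⟩
    rcases pvCands_dominates N hN arr c hsub hcne hlen with ⟨v, hv, hle⟩
    exact le_trans hle (hmbMax v hv)
  -- mb ≤ ma: mb is realized as a subsequence sum, hence an element of all_sums
  have h2 : mb ≤ ma := by
    rcases pvCands_realized N hN arr mb hmbMem with ⟨c, hsub, hcne, hlen, rfl⟩
    exact hmaMax _ ((mem_pvAllSums arr N _).mpr ⟨c, hsub, hcne, hlen, rfl⟩)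
  omega
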